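-- pv_equiv track=rewrite | github.com/Nephidra/GOA-Homeworks | Day-0070/hw/main.py | generate_2d_array
-- ===== SOURCE A (Python) =====
-- def generate_2d_array(rows, cols):
--     result = []
--     num = 1
--     for i in range(rows):
--         row = []
--         for j in range(cols):
--             row.append(num)
--             num += 1
--         result.append(row)
--     return result
-- ===== SOURCE B (Python) =====
-- def generate_2d_array(rows, cols):
--     nums = range(1, rows * cols + 1)
--     return [list(nums[i * cols:(i + 1) * cols]) for i in range(rows)]
-- ===== Notes on version B (the rewrite author's own statement) =====
-- stated objective: simpler
-- what changed: Builds the flat sequence 1..rows*cols once and partitions it into rows slices of length cols, instead of threading an incrementing counter through nested append loops.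
import Mathlib
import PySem

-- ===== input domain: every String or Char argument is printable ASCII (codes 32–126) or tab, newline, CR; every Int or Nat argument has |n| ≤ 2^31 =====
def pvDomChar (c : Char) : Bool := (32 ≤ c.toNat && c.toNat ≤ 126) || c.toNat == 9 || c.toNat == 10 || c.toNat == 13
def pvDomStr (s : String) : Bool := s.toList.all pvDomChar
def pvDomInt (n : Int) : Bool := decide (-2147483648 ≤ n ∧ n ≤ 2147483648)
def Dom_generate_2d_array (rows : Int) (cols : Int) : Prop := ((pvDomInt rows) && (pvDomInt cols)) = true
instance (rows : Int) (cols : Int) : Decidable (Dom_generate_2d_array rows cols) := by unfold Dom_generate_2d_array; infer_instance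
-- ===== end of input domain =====

-- ===== PORT A =====
-- Port of A: nested loops threading (result, num) through folds over pyRange.
def generate_2d_array (rows : Int) (cols : Int) : List (List Int) :=
  ((PySem.List.pyRange 0 rows 1).foldl
    (fun (st : List (List Int) × Int) _ =>
      let inner := (PySem.List.pyRange 0 cols 1).foldl
        (fun (rs : List Int × Int) _ => (rs.1 ++ [rs.2], rs.2 + 1)) ([], st.2)
      (st.1 ++ [inner.1], inner.2))
    ([], 1)).1

-- ===== PORT B =====
-- Port of B: the flat range 1..rows*cols, chunked into rows slices of length cols.
-- Python's `nums` is a lazy O(1) range object sliced per row; the port materializes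
-- that range at each slice, which denotes the same list.
def generate_2d_array_alt (rows : Int) (cols : Int) : List (List Int) :=
  (PySem.List.pyRange 0 rows 1).map
    (fun i => PySem.List.slice (PySem.List.pyRange 1 (rows * cols + 1) 1)
      (some (i * cols)) (some ((i + 1) * cols)))

-- ===== PRECONDITION & SPEC =====
def Spec_generate_2d_array (rows : Int) (cols : Int) (out : List (List Int)) : Prop := out = generate_2d_array_alt rows cols
instance (rows : Int) (cols : Int) (out : List (List Int)) : Decidable (Spec_generate_2d_array rows cols out) := by unfold Spec_generate_2d_array; infer_instance

-- ===== CLAIM (what is proved, stated in full; the proofs are below) =====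
def Claim_equal_generate_2d_array : Prop := ∀ (rows : Int) (cols : Int), Dom_generate_2d_array rows cols → Spec_generate_2d_array rows cols (generate_2d_array rows cols)

-- ===== LEMMAS AND PROOFS =====

theorem inner_fold (L : List Int) (acc : List Int) (num : Int) :
    L.foldl (fun (rs : List Int × Int) _ => (rs.1 ++ [rs.2], rs.2 + 1)) (acc, num)
      = (acc ++ PySem.List.pyRange num (num + L.length) 1, num + L.length) := by
  induction L generalizing acc num with
  | nil => simp [PySem.List.pyRange_one_eq_nil (le_refl num)]
  | cons x L ih =>
    simp only [List.foldl_cons, ih, List.length_cons]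
    rw [Prod.mk.injEq]
    refine ⟨?_, by push_cast; ring⟩
    rw [PySem.List.pyRange_one_cons (by push_cast; omega : num < num + ((L.length + 1 : Nat) : Int))]
    simp only [List.append_assoc, List.singleton_append]
    congr 1; push_cast; ring

theorem drop_pyRange (a b : Int) (j : Nat) :
    (PySem.List.pyRange a b 1).drop j = PySem.List.pyRange (a + j) b 1 := by
  induction j generalizing a with
  | zero => simp
  | succ j ih =>
    by_cases h : a < b
    · rw [PySem.List.pyRange_one_cons h]
      simp only [List.drop_succ_cons, ih]
      congr 1; push_cast; ring
    · rw [PySem.List.pyRange_one_eq_nil (by omega), PySem.List.pyRange_one_eq_nil (by push_cast; omega)]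
      simp

theorem take_pyRange (a b : Int) (n : Nat) :
    (PySem.List.pyRange a b 1).take n = PySem.List.pyRange a (min (a + n) b) 1 := by
  induction n generalizing a with
  | zero =>
    rw [PySem.List.pyRange_one_eq_nil (by push_cast; omega : min (a + ((0:Nat):Int)) b ≤ a)]
    simp
  | succ n ih =>
    by_cases h : a < b
    · rw [PySem.List.pyRange_one_cons h]
      simp only [List.take_succ_cons, ih]
      rw [PySem.List.pyRange_one_cons (by push_cast; omega : a < min (a + ((n+1:Nat) : Int)) b)]
      congr 2; push_cast; omega
    · rw [PySem.List.pyRange_one_eq_nil (by omega),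
        PySem.List.pyRange_one_eq_nil (by push_cast; omega : min (a + ((n+1:Nat):Int)) b ≤ a)]
      simp

theorem outer_fold (c : Int) (L : List Int) (acc : List (List Int)) (num : Int) :
    L.foldl (fun (st : List (List Int) × Int) _ =>
        (st.1 ++ [PySem.List.pyRange st.2 (st.2 + c) 1], st.2 + c)) (acc, num)
      = (acc ++ (List.range L.length).map
          (fun (k : Nat) => PySem.List.pyRange (num + (k : Int) * c)
            (num + (k : Int) * c + c) 1),
         num + L.length * c) := by
  induction L generalizing acc num with
  | nil => simp
  | cons x L ih =>
    simp only [List.foldl_cons, ih, List.length_cons]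
    rw [Prod.mk.injEq]
    refine ⟨?_, by push_cast; ring⟩
    rw [List.range_succ_eq_map]
    simp only [List.map_cons, List.map_map, List.append_assoc, List.singleton_append]
    congr 2
    · congr 1 <;> (push_cast; ring)
    · apply List.map_congr_left; intro k _
      simp only [Function.comp_apply]
      congr 1 <;> (push_cast; ring)

theorem a_closed (rows cols : Int) :
    generate_2d_array rows cols
      = (List.range rows.toNat).map
          (fun (k : Nat) => PySem.List.pyRange (1 + (k : Int) * (cols.toNat : Int))
            (1 + (k : Int) * (cols.toNat : Int) + (cols.toNat : Int)) 1) := by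
  unfold generate_2d_array
  have hlen : ((PySem.List.pyRange 0 cols 1).length : Int) = (cols.toNat : Int) := by
    rw [PySem.List.length_pyRange_one]; omega
  simp only [inner_fold, hlen, List.nil_append]
  rw [outer_fold]
  simp [PySem.List.length_pyRange_one]

theorem b_row (rows cols : Int) (k : Nat) (hk : (k : Int) < rows) :
    PySem.List.slice (PySem.List.pyRange 1 (rows * cols + 1) 1)
        (some ((k : Int) * cols)) (some (((k : Int) + 1) * cols))
      = PySem.List.pyRange (1 + (k : Int) * (cols.toNat : Int))
          (1 + (k : Int) * (cols.toNat : Int) + (cols.toNat : Int)) 1 := by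
  by_cases hc : 0 < cols
  · have h1 : (0:Int) ≤ (k : Int) * cols := by positivity
    have h2 : (0:Int) ≤ ((k : Int) + 1) * cols := by positivity
    rw [PySem.List.slice_toNat _ h1 h2, drop_pyRange, take_pyRange]
    have e1 : (1 : Int) + (((k : Int) * cols).toNat : Int) = 1 + (k : Int) * (cols.toNat : Int) := by
      rw [Int.toNat_of_nonneg h1, Int.toNat_of_nonneg (le_of_lt hc)]
    rw [e1]
    congr 1
    have e2 : (((((k : Int) + 1) * cols).toNat - ((k : Int) * cols).toNat : Nat) : Int)
        = cols := by
      rw [Int.ofNat_sub (Int.toNat_le_toNat (by nlinarith))]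
      rw [Int.toNat_of_nonneg h1, Int.toNat_of_nonneg h2]; ring
    have e3 : (1 + (k : Int) * (cols.toNat : Int)
        + ((((k : Int) + 1) * cols).toNat - ((k : Int) * cols).toNat : Nat) : Int)
        = 1 + ((k : Int) + 1) * cols := by
      rw [e2, Int.toNat_of_nonneg (le_of_lt hc)]; ring
    rw [min_eq_left (by
      rw [e3]
      have : ((k : Int) + 1) * cols ≤ rows * cols := by
        apply mul_le_mul_of_nonneg_right _ (le_of_lt hc); omega
      omega)]
    rw [e3, Int.toNat_of_nonneg (le_of_lt hc)]; ring_nf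
  · -- cols ≤ 0: the flat list is empty (rows > 0 here) and each row range is empty too
    have hnil : PySem.List.pyRange 1 (rows * cols + 1) 1 = [] := by
      apply PySem.List.pyRange_one_eq_nil
      nlinarith
    have hc0 : cols.toNat = 0 := by omega
    rw [hnil, hc0, PySem.List.pyRange_one_eq_nil (by push_cast; omega)]
    simp [PySem.List.slice]

-- ===== VERDICT (by name: the statement is the Claim_ definition above) =====
theorem generate_2d_array_spec : Claim_equal_generate_2d_array := by
  intro rows cols _
  unfold Spec_generate_2d_array generate_2d_array_alt
  rw [a_closed, PySem.List.pyRange_one 0 rows]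
  simp only [List.map_map, Int.sub_zero]
  apply List.map_congr_left
  intro k hk
  simp only [Function.comp_apply, zero_add]
  exact (b_row rows cols k (by have := List.mem_range.mp hk; omega)).symm
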